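-- pv_equiv track=rewrite | github.com/Ircama/freetz-ng | tools/router_update.py | parse_df_output
-- ===== SOURCE A (Python) =====
-- def parse_df_output(df_text):
--     """Parse df -h output to detect storage devices and UBI"""
--     storage = []
--     ubi_info = None
--
--     for line in df_text.splitlines()[1:]:  # Skip header
--         parts = line.split()
--         if len(parts) >= 6:
--             filesystem = parts[0]
--             size = parts[1]
--             used = parts[2]
--             available = parts[3]
--             use_percent = parts[4]
--             mountpoint = ' '.join(parts[5:])
--
--             # Detect UBI (internal flash storage)
--             # UBI devices are mounted at /var/media/ftp or subdirectories
--             if '/dev/ubi' in filesystem and '/var/media/ftp' in mountpoint: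
--                 # Prefer the root UBI mount point (/var/media/ftp)
--                 # If we already have a UBI but this one is shorter path, replace it
--                 if ubi_info is None or len(mountpoint) < len(ubi_info['mountpoint']):
--                     ubi_info = {
--                         'filesystem': filesystem,
--                         'size': size,
--                         'available': available,
--                         'mountpoint': mountpoint
--                     }
--
--             # Detect external storage (USB, SD card, etc.)
--             # Only count devices that are NOT the UBI itself
--             elif filesystem.startswith('/dev/sd') or filesystem.startswith('/dev/mmc'):
--                 storage.append({
--                     'device': filesystem,
--                     'size': size,
--                     'available': available,
--                     'use_percent': use_percent,
--                     'mountpoint': mountpoint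
--                 })
--
--     return ubi_info, storage
-- ===== SOURCE B (Python) =====
-- def parse_df_output(df_text):
--     """Parse df -h output to detect storage devices and UBI"""
--     rows = [(p[0], p[1], p[3], p[4], ' '.join(p[5:]))
--             for p in map(str.split, df_text.splitlines()[1:]) if len(p) >= 6]
--
--     def is_ubi(r):
--         return '/dev/ubi' in r[0] and '/var/media/ftp' in r[4]
--
--     candidates = [r for r in rows if is_ubi(r)]
--     ubi_info = None
--     if candidates:
--         fs, size, avail, _, mp = min(candidates, key=lambda r: len(r[4]))
--         ubi_info = {'filesystem': fs, 'size': size,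
--                     'available': avail, 'mountpoint': mp}
--
--     storage = [{'device': fs, 'size': size, 'available': avail,
--                 'use_percent': up, 'mountpoint': mp}
--                for (fs, size, avail, up, mp) in rows
--                if not is_ubi((fs, size, avail, up, mp))
--                and (fs.startswith('/dev/sd') or fs.startswith('/dev/mmc'))]
--     return ubi_info, storage
-- ===== Notes on version B (the rewrite author's own statement) =====
-- stated objective: alternative
-- what changed: Replaces the single accumulating loop (conditional appends plus an inline shortest-mountpoint tracker) with a parse-once pass into row tuples followed by two independent filter passes and a min-by-key reduction for the UBI entry.
import Mathlib
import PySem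

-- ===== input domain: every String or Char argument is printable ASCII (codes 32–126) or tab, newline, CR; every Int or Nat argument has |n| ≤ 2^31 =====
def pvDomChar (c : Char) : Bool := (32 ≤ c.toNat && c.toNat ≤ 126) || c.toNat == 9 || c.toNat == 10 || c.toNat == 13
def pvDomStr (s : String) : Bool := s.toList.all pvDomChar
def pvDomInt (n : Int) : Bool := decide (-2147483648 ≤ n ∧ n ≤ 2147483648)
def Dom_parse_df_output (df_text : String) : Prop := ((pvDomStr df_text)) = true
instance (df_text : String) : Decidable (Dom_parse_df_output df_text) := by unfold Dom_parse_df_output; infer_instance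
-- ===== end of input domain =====

-- B replaces A's single accumulating loop by a parse pass into row tuples followed by
-- independent filter passes and a min-by-mountpoint-length reduction (objective: alternative decomposition).

-- ===== PORT A =====
def pvMkUbi (fs sz av mp : String) : List (String × String) :=
  [("filesystem", fs), ("size", sz), ("available", av), ("mountpoint", mp)]

def pvMkStor (fs sz av up mp : String) : List (String × String) :=
  [("device", fs), ("size", sz), ("available", av), ("use_percent", up), ("mountpoint", mp)]

def pvStepA (st : Option (PySem.Dict String String) × List (List (String × String)))
    (line : String) : Option (PySem.Dict String String) × List (List (String × String)) :=
  match PySem.Str.split₀ line with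
  | fs :: sz :: _used :: av :: up :: m0 :: rest =>
    let mp := PySem.Str.join " " (m0 :: rest)
    if PySem.Str.isIn "/dev/ubi" fs && PySem.Str.isIn "/var/media/ftp" mp then
      match st.1 with
      | none => (some ⟨pvMkUbi fs sz av mp⟩, st.2)
      | some u =>
        if PySem.Str.len mp < PySem.Str.len (PySem.Dict.getD u "mountpoint" "") then
          (some ⟨pvMkUbi fs sz av mp⟩, st.2)
        else st
    else
      if PySem.Str.startswith fs "/dev/sd" || PySem.Str.startswith fs "/dev/mmc" then
        (st.1, st.2 ++ [pvMkStor fs sz av up mp])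
      else st
  | _ => st

def parse_df_output (df_text : String) :
    (Option (List (String × String))) × (List (List (String × String))) :=
  let res := (PySem.List.slice (PySem.Str.splitlines df_text) (some 1) none).foldl pvStepA (none, [])
  (res.1.map PySem.Dict.items, res.2)

-- ===== PORT B =====
def pvRow (line : String) : Option (String × String × String × String × String) :=
  match PySem.Str.split₀ line with
  | fs :: sz :: _used :: av :: up :: m0 :: rest =>
      some (fs, sz, av, up, PySem.Str.join " " (m0 :: rest))
  | _ => none

def pvIsUbi (r : String × String × String × String × String) : Bool :=
  PySem.Str.isIn "/dev/ubi" r.1 && PySem.Str.isIn "/var/media/ftp" r.2.2.2.2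

def parse_df_output_alt (df_text : String) :
    (Option (List (String × String))) × (List (List (String × String))) :=
  let rows := (PySem.List.slice (PySem.Str.splitlines df_text) (some 1) none).filterMap pvRow
  let ubi := (PySem.List.min? (rows.filter pvIsUbi)
      (fun r => PySem.Str.len r.2.2.2.2)).map
      (fun r => pvMkUbi r.1 r.2.1 r.2.2.1 r.2.2.2.2)
  let storage := (rows.filter (fun r => !(pvIsUbi r) &&
      (PySem.Str.startswith r.1 "/dev/sd" || PySem.Str.startswith r.1 "/dev/mmc"))).map
      (fun r => pvMkStor r.1 r.2.1 r.2.2.1 r.2.2.2.1 r.2.2.2.2)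
  (ubi, storage)

-- ===== PRECONDITION & SPEC =====
def Spec_parse_df_output (df_text : String)
    (out : (Option (List (String × String))) × (List (List (String × String)))) : Prop :=
  out = parse_df_output_alt df_text
instance (df_text : String) (out : (Option (List (String × String))) × (List (List (String × String)))) : Decidable (Spec_parse_df_output df_text out) := by unfold Spec_parse_df_output; infer_instance

-- ===== CLAIM (what is proved, stated in full; the proofs are below) =====
def Claim_equal_parse_df_output : Prop := ∀ (df_text : String), Dom_parse_df_output df_text → Spec_parse_df_output df_text (parse_df_output df_text)

-- ===== LEMMAS AND PROOFS =====
theorem pvGetD_mkUbi (fs sz av mp : String) :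
    PySem.Dict.getD (⟨pvMkUbi fs sz av mp⟩ : PySem.Dict String String) "mountpoint" "" = mp := by
  simp [pvMkUbi, PySem.Dict.getD, PySem.Dict.get?, List.find?]

-- one step of PySem.List.min? with key = mountpoint length
def pvMinStep (acc : Option (String × String × String × String × String))
    (r : String × String × String × String × String) :
    Option (String × String × String × String × String) :=
  match acc with
  | none => some r
  | some m => if PySem.Str.len r.2.2.2.2 < PySem.Str.len m.2.2.2.2 then some r else some m

def pvUbiOf (r : String × String × String × String × String) : List (String × String) :=
  pvMkUbi r.1 r.2.1 r.2.2.1 r.2.2.2.2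

def pvDictOf (r : String × String × String × String × String) : PySem.Dict String String :=
  ⟨pvUbiOf r⟩

def pvStorOf (r : String × String × String × String × String) : List (String × String) :=
  pvMkStor r.1 r.2.1 r.2.2.1 r.2.2.2.1 r.2.2.2.2

def pvStorPred (r : String × String × String × String × String) : Bool :=
  !(pvIsUbi r) && (PySem.Str.startswith r.1 "/dev/sd" || PySem.Str.startswith r.1 "/dev/mmc")

theorem pvStepA_of_none {line : String}
    (h : pvRow line = none)
    (st : Option (PySem.Dict String String) × List (List (String × String))) :
    pvStepA st line = st := by
  unfold pvRow at h
  unfold pvStepA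
  rcases hs : PySem.Str.split₀ line with _ | ⟨fs, _ | ⟨sz, _ | ⟨us, _ | ⟨av, _ | ⟨up, _ | ⟨m0, rest⟩⟩⟩⟩⟩⟩ <;>
    simp_all

theorem pvStepA_of_some {line : String} {r : String × String × String × String × String}
    (h : pvRow line = some r)
    (c : Option (String × String × String × String × String))
    (acc : List (List (String × String))) :
    pvStepA (c.map pvDictOf, acc) line
      = ( (if pvIsUbi r then pvMinStep c r else c).map pvDictOf,
          if pvStorPred r then acc ++ [pvStorOf r] else acc ) := by
  unfold pvRow at h
  unfold pvStepA
  rcases hs : PySem.Str.split₀ line with _ | ⟨fs, _ | ⟨sz, _ | ⟨us, _ | ⟨av, _ | ⟨up, _ | ⟨m0, rest⟩⟩⟩⟩⟩⟩ <;>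
    rw [hs] at h <;> simp only [Option.some.injEq, reduceCtorEq] at h
  subst h
  simp only [pvIsUbi, pvStorPred, pvStorOf, pvMkStor]
  by_cases hubi : (PySem.Str.isIn "/dev/ubi" fs &&
      PySem.Str.isIn "/var/media/ftp" (PySem.Str.join " " (m0 :: rest))) = true
  · simp only [hubi, if_pos, Bool.not_true, Bool.false_and, Bool.false_eq_true, if_neg,
      not_false_iff]
    cases c with
    | none => simp [pvMinStep, pvDictOf, pvUbiOf]
    | some m =>
      simp only [Option.map_some, pvDictOf, pvUbiOf, pvMinStep]
      rw [pvGetD_mkUbi]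
      split_ifs <;> rfl
  · simp only [Bool.not_eq_true] at hubi
    simp only [hubi, Bool.false_eq_true, if_neg, not_false_iff, Bool.not_false, Bool.true_and]
    split_ifs <;> rfl

theorem pvFold_inv (lines : List String)
    (c : Option (String × String × String × String × String))
    (acc : List (List (String × String))) :
    lines.foldl pvStepA (c.map pvDictOf, acc)
      = ( (((lines.filterMap pvRow).filter pvIsUbi).foldl pvMinStep c).map pvDictOf,
          acc ++ ((lines.filterMap pvRow).filter pvStorPred).map pvStorOf ) := by
  induction lines generalizing c acc with
  | nil => simp
  | cons line tl ih =>
    simp only [List.foldl_cons, List.filterMap_cons]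
    cases hrow : pvRow line with
    | none => rw [pvStepA_of_none hrow, ih]
    | some r =>
      rw [pvStepA_of_some hrow c acc]
      by_cases hubi : pvIsUbi r = true
      · have hnstor : pvStorPred r = false := by simp [pvStorPred, hubi]
        rw [if_pos hubi, if_neg (by simp [hnstor]),
          List.filter_cons_of_pos hubi, List.filter_cons_of_neg (by simp [hnstor]),
          List.foldl_cons]
        exact ih _ _
      · simp only [Bool.not_eq_true] at hubi
        rw [if_neg (by simp [hubi]), List.filter_cons_of_neg (by simp [hubi])]
        by_cases hst : pvStorPred r = true
        · rw [if_pos hst, List.filter_cons_of_pos hst, List.map_cons, ih]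
          simp
        · simp only [Bool.not_eq_true] at hst
          rw [if_neg (by simp [hst]), List.filter_cons_of_neg (by simp [hst])]
          exact ih _ _

theorem pvMin?_eq_fold (xs : List (String × String × String × String × String)) :
    PySem.List.min? xs (fun r => PySem.Str.len r.2.2.2.2) = xs.foldl pvMinStep none := by
  unfold PySem.List.min?
  congr 1
  funext acc x
  cases acc <;> rfl

-- ===== VERDICT (by name: the statement is the Claim_ definition above) =====
theorem parse_df_output_spec : Claim_equal_parse_df_output := by
  intro df_text _
  unfold Spec_parse_df_output parse_df_output parse_df_output_alt
  have h := pvFold_inv (PySem.List.slice (PySem.Str.splitlines df_text) (some 1) none) none []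
  simp only [Option.map_none, List.nil_append] at h
  simp only [h, pvMin?_eq_fold, Option.map_map]
  rfl
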